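-- pv_equiv track=rewrite | github.com/ZYiJie/sohu-2022-competition | SentimentClassification/src/utils/load_datasets.py | sample_context
-- ===== SOURCE A (Python) =====
-- def merge_idx(idxArr, span, content):
--     assert len(idxArr) >= 1
--     if len(idxArr)==1:
--         return content[max(0,idxArr[0]-span) : min(len(content),idxArr[0]+span)]
--     i = 0
--     ret = []
--     while True:
--         if i>=len(idxArr):break
--         temp_i = i
--         for j in range(i+1,len(idxArr)):
--             if idxArr[j]-idxArr[temp_i] > 2*span:
--                 temp_i = j-1
--                 break
--             else:
--                 temp_i = j
--         ret.append(content[max(0,idxArr[i]-span) : min(len(content),idxArr[temp_i]+span)])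
--         i = temp_i+1
--     return '#'.join(ret)
--
-- def sample_context(entity:str, content:str, length:int):
--     cnt = content.count(entity)
--     span = int(length/cnt/2)
--     assert cnt > 0
--     idx = content.find(entity,0)
--     idxArr = []
--     while idx != -1:
--         idxArr.append(idx)
--         idx = content.find(entity,idx+1)
--     result = merge_idx(idxArr, span, content)
--     return result
-- ===== SOURCE B (Python) =====
-- def sample_context(entity: str, content: str, length: int):
--     cnt = content.count(entity)
--     span = int(length / cnt / 2)
--     assert cnt > 0
--     idxArr = []
--     idx = content.find(entity, 0)
--     while idx != -1:
--         idxArr.append(idx)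
--         idx = content.find(entity, idx + 1)
--     # standard interval merge over the raw (unclamped) windows [i-span, i+span],
--     # one linear pass; clamp only when slicing
--     pieces = []
--     cur_start = idxArr[0] - span
--     cur_end = idxArr[0] + span
--     for i in idxArr[1:]:
--         if i - span <= cur_end:
--             cur_end = i + span
--         else:
--             pieces.append(content[max(0, cur_start):min(len(content), cur_end)])
--             cur_start, cur_end = i - span, i + span
--     pieces.append(content[max(0, cur_start):min(len(content), cur_end)])
--     return '#'.join(pieces)
-- ===== Notes on version B (the rewrite author's own statement) =====
-- stated objective: simpler
-- what changed: The nested while/for grouping of merge_idx (index jumping with temp_i and break) is replaced by a standard one-pass interval merge that keeps a current (cur_start, cur_end) window, deciding merges on raw unclamped bounds and clamping only when slicing; the len==1 special case and the merge_idx helper disappear.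
import Mathlib
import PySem

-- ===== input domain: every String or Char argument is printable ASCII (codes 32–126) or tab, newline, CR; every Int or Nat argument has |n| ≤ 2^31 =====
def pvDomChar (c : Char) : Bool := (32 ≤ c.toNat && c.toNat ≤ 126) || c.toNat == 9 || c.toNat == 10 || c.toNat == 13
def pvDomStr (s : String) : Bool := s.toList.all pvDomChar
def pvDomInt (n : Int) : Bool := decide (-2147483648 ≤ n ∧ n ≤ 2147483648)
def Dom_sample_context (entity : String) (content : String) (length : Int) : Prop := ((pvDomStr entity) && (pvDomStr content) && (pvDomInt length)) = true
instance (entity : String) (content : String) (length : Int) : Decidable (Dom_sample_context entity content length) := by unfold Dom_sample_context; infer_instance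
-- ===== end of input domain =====

-- B replaces A's nested while/for grouping (merge_idx) by a standard one-pass interval merge; simpler decomposition, same result.


-- ===== PORT A =====
-- shared primitive helpers (used verbatim by both Pythons):
-- content[max(0, lo) : min(len(content), hi)]
def pvClamp (content : List Char) (lo hi : Int) : List Char :=
  PySem.List.slice content (some (max 0 lo)) (some (min (content.length : Int) hi))

-- the occurrence-collecting while loop: idx = find(entity, 0); while idx != -1: append; idx = find(entity, idx+1).
-- fuel: each successful find returns an index strictly larger than the previous one and ≤ len(content),
-- so len(content)+2 iterations always suffice; the loop is a faithful transliteration.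
def pvFindAll (content entity : List Char) : Int → Nat → List Int
  | _, 0 => []
  | idx, fuel + 1 =>
    if idx = -1 then []
    else idx :: pvFindAll content entity (PySem.Chars.findFrom content entity (idx + 1)) fuel

-- A's inner 'for j in range(i+1, len(idxArr))' with break: returns the final temp_i.
-- (loop counters are kept as Nat indices into idxArr; idxArr values stay Int)
def pvForTemp (arr : List Int) (span : Int) : List Nat → Nat → Nat
  | [], t => t
  | j :: js, t =>
    if arr.getD j 0 - arr.getD t 0 > 2 * span then j - 1
    else pvForTemp arr span js j

-- bound needed for termination of pvWhile (cited in its decreasing_by)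
theorem pvForTemp_bounds (arr : List Int) (span : Int) (i : Nat) :
    ∀ (js : List Nat) (t : Nat), (∀ j ∈ js, i + 1 ≤ j ∧ j < arr.length) →
      i ≤ t → t < arr.length →
      i ≤ pvForTemp arr span js t ∧ pvForTemp arr span js t < arr.length := by
  intro js
  induction js with
  | nil => intro t _ h1 h2; exact ⟨h1, h2⟩
  | cons j js ih =>
    intro t hmem h1 h2
    have hj := hmem j (by simp)
    simp only [pvForTemp]
    split
    · omega
    · exact ih j (fun x hx => hmem x (by simp [hx])) (by omega) hj.2

-- A's outer 'while True' loop with accumulator ret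
def pvWhile (arr : List Int) (span : Int) (content : List Char) (i : Nat) (ret : List (List Char)) : List (List Char) :=
  if _h : arr.length ≤ i then ret
  else
    let t := pvForTemp arr span (List.range' (i + 1) (arr.length - (i + 1))) i
    pvWhile arr span content (t + 1)
      (ret ++ [pvClamp content (arr.getD i 0 - span) (arr.getD t 0 + span)])
termination_by arr.length - i
decreasing_by
  have hb := pvForTemp_bounds arr span i (List.range' (i + 1) (arr.length - (i + 1))) i
    (by intro j hj; have := List.mem_range'.mp hj; omega) (le_refl i) (by omega)
  omega

def pvMergeIdx (arr : List Int) (span : Int) (content : List Char) : List Char :=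
  if arr.length = 1 then pvClamp content (arr.getD 0 0 - span) (arr.getD 0 0 + span)
  else PySem.Chars.join ['#'] (pvWhile arr span content 0 [])

-- span = int(length/cnt/2): exact as truncated integer division of length by 2*cnt, since the float
-- value length/cnt rounds once (then /2 is exact) and for |length| ≤ 2^31 the rounding error cannot
-- cross an integer boundary; PySem.Int.truncdiv is int(a/b) exactly on this range.
def sample_context (entity : String) (content : String) (length : Int) : String :=
  let cs := content.toList
  let es := entity.toList
  let cnt : Int := (PySem.Chars.count cs es : Int)
  let span := PySem.Int.truncdiv length (2 * cnt)
  let idxArr := pvFindAll cs es (PySem.Chars.findFrom cs es 0) (cs.length + 2)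
  String.ofList (pvMergeIdx idxArr span cs)

-- ===== PORT B =====
-- B's single linear merge pass over the remaining occurrences, carrying (cur_start, cur_end, pieces)
def pvBGo (content : List Char) (span : Int) : List Int → Int → Int → List (List Char) → List (List Char)
  | [], curStart, curEnd, pieces => pieces ++ [pvClamp content curStart curEnd]
  | x :: xs, curStart, curEnd, pieces =>
    if x - span ≤ curEnd then pvBGo content span xs curStart (x + span) pieces
    else pvBGo content span xs (x - span) (x + span) (pieces ++ [pvClamp content curStart curEnd])

def sample_context_alt (entity : String) (content : String) (length : Int) : String :=
  let cs := content.toList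
  let es := entity.toList
  let cnt : Int := (PySem.Chars.count cs es : Int)
  let span := PySem.Int.truncdiv length (2 * cnt)
  let idxArr := pvFindAll cs es (PySem.Chars.findFrom cs es 0) (cs.length + 2)
  String.ofList (PySem.Chars.join ['#']
    (pvBGo cs span (PySem.List.slice idxArr (some 1) none)
      (idxArr.headD 0 - span) (idxArr.headD 0 + span) []))

-- ===== PRECONDITION & SPEC =====
-- A raises ZeroDivisionError (and would fail its assert) exactly when entity does not occur in content.
def Pre_sample_context (entity : String) (content : String) (length : Int) : Prop :=
  PySem.Str.find content entity ≠ -1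
instance (entity : String) (content : String) (length : Int) : Decidable (Pre_sample_context entity content length) := by unfold Pre_sample_context; infer_instance

def pvWitness_sample_context : String × String × Int := ("a", "banana", 6)

def Spec_sample_context (entity : String) (content : String) (length : Int) (out : String) : Prop := out = sample_context_alt entity content length
instance (entity : String) (content : String) (length : Int) (out : String) : Decidable (Spec_sample_context entity content length out) := by unfold Spec_sample_context; infer_instance

-- ===== CLAIM (what is proved, stated in full; the proofs are below) =====
def Claim_equal_sample_context : Prop := ∀ (entity : String) (content : String) (length : Int), Dom_sample_context entity content length → Pre_sample_context entity content length → Spec_sample_context entity content length (sample_context entity content length)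

-- ===== LEMMAS AND PROOFS =====

-- Key step lemma: one group of A's grouping (an inner for-loop run) is what B's pass does
-- across the same stretch of occurrences.
theorem pvBGo_group (arr : List Int) (span : Int) (content : List Char) :
    ∀ (m i : Nat) (curStart : Int) (ret : List (List Char)), i < arr.length → arr.length - 1 - i = m →
      pvBGo content span (arr.drop (i + 1)) curStart (arr.getD i 0 + span) ret =
        (let t := pvForTemp arr span (List.range' (i + 1) (arr.length - (i + 1))) i
         if arr.length ≤ t + 1 then ret ++ [pvClamp content curStart (arr.getD t 0 + span)]
         else pvBGo content span (arr.drop (t + 2)) (arr.getD (t + 1) 0 - span)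
           (arr.getD (t + 1) 0 + span) (ret ++ [pvClamp content curStart (arr.getD t 0 + span)])) := by
  intro m
  induction m with
  | zero =>
    intro i curStart ret hi hm
    have h1 : arr.length - (i + 1) = 0 := by omega
    have h2 : arr.drop (i + 1) = [] := List.drop_eq_nil_of_le (by omega)
    simp [h1, h2, pvForTemp, pvBGo, show arr.length ≤ i + 1 by omega]
  | succ m ih =>
    intro i curStart ret hi hm
    have hi1 : i + 1 < arr.length := by omega
    have hdrop : arr.drop (i + 1) = arr[i + 1] :: arr.drop (i + 2) :=
      List.drop_eq_getElem_cons hi1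
    have hrange : List.range' (i + 1) (arr.length - (i + 1)) =
        (i + 1) :: List.range' (i + 2) (arr.length - (i + 2)) := by
      have : arr.length - (i + 1) = (arr.length - (i + 2)) + 1 := by omega
      rw [this, List.range'_succ]
    have hgd : arr.getD (i + 1) 0 = arr[i + 1] := List.getD_eq_getElem arr 0 hi1
    rw [hdrop, hrange]
    simp only [pvBGo, pvForTemp, hgd]
    by_cases hc : arr[i + 1] - arr.getD i 0 > 2 * span
    · -- gap too large: A breaks (temp_i = i), B starts a new group
      have hc' : ¬ (arr[i + 1] - span ≤ arr.getD i 0 + span) := by omega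
      simp only [if_pos hc, if_neg hc']
      have : i + 1 - 1 = i := by omega
      rw [this]
      have hgd' : arr[i + 1]?.getD 0 = arr[i + 1] := by simpa [List.getD] using hgd
      simp [show ¬ arr.length ≤ i + 1 by omega, hgd']
    · -- gap small: A's for-loop advances temp_i, B extends cur_end
      have hc' : arr[i + 1] - span ≤ arr.getD i 0 + span := by omega
      simp only [if_neg hc, if_pos hc']
      rw [← hgd]
      exact ih (i + 1) curStart ret hi1 (by omega)

-- A's while loop equals B's pass, from any group start i.
theorem pvWhile_eq_pvBGo (arr : List Int) (span : Int) (content : List Char) :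
    ∀ (k i : Nat) (ret : List (List Char)), arr.length - i ≤ k → i < arr.length →
      pvWhile arr span content i ret =
        pvBGo content span (arr.drop (i + 1)) (arr.getD i 0 - span) (arr.getD i 0 + span) ret := by
  intro k
  induction k with
  | zero => intro i ret hk hi; omega
  | succ k ih =>
    intro i ret hk hi
    rw [pvWhile, dif_neg (by omega)]
    have hb := pvForTemp_bounds arr span i (List.range' (i + 1) (arr.length - (i + 1))) i
      (by intro j hj; have := List.mem_range'.mp hj; omega) (le_refl i) hi
    rw [pvBGo_group arr span content (arr.length - 1 - i) i (arr.getD i 0 - span) ret hi rfl]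
    set t := pvForTemp arr span (List.range' (i + 1) (arr.length - (i + 1))) i with ht
    by_cases hend : arr.length ≤ t + 1
    · simp only [if_pos hend]
      rw [pvWhile, dif_pos hend]
    · simp only [if_neg hend]
      exact ih (t + 1) _ (by omega) (by omega)

-- The whole of merge_idx equals B's merge (for a nonempty occurrence list).
theorem pvMergeIdx_eq (arr : List Int) (span : Int) (content : List Char) (h : arr ≠ []) :
    pvMergeIdx arr span content =
      PySem.Chars.join ['#']
        (pvBGo content span arr.tail (arr.headD 0 - span) (arr.headD 0 + span) []) := by
  obtain ⟨a, rest⟩ := List.exists_cons_of_ne_nil h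
  obtain ⟨l, rfl⟩ := rest
  by_cases h1 : (a :: l).length = 1
  · have : l = [] := by
      cases l with
      | nil => rfl
      | cons b bs => simp at h1
    subst this
    simp [pvMergeIdx, pvBGo, PySem.Chars.join_singleton]
  · rw [pvMergeIdx, if_neg h1]
    have h0 : (0 : Nat) < (a :: l).length := by simp
    rw [pvWhile_eq_pvBGo (a :: l) span content (a :: l).length 0 [] (by omega) h0]
    simp

-- entity occurs (Pre_) → the collected occurrence list is nonempty
theorem pvFindAll_ne_nil (content entity : List Char) (idx : Int) (fuel : Nat)
    (hidx : idx ≠ -1) (hfuel : 0 < fuel) :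
    pvFindAll content entity idx fuel ≠ [] := by
  cases fuel with
  | zero => omega
  | succ n => simp [pvFindAll, hidx]

-- ===== VERDICT (by name: the statement is the Claim_ definition above) =====
theorem sample_context_spec : Claim_equal_sample_context := by
  intro entity content length _ hpre
  unfold Spec_sample_context sample_context sample_context_alt
  have hfind : PySem.Chars.findFrom content.toList entity.toList 0 ≠ -1 := by
    have := hpre
    unfold Pre_sample_context at this
    simpa [PySem.Chars.findFrom_zero] using this
  have hne : pvFindAll content.toList entity.toList
      (PySem.Chars.findFrom content.toList entity.toList 0) (content.toList.length + 2) ≠ [] :=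
    pvFindAll_ne_nil _ _ _ _ hfind (by omega)
  simp only [pvMergeIdx_eq _ _ _ hne, PySem.List.slice_from_one]
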